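-- pv_equiv track=rewrite | github.com/al-mong/algorithm_study | seungtae/23_01/programmers/87946.py | solution
-- ===== SOURCE A (Python) =====
-- import itertools
--
-- def solution(k, dungeons):
--     max_count = 0
--     for per in itertools.permutations(dungeons, len(dungeons)):
--         count = 0
--         kk = k
--         for p in per:
--             if kk >= p[0]:
--                 count += 1
--                 kk -= p[1]
--         max_count = max(max_count, count)
--
--     return max_count
-- ===== SOURCE B (Python) =====
-- def solution(k, dungeons):
--     # Recursive backtracking: try each still-available, affordable dungeon next;
--     # no need to consider skipping an affordable-or-not dungeon and keeping it for later
--     # inside one ordering, since any cleared subsequence is itself an ordering.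
--     def dfs(energy, remaining):
--         best = 0
--         for i in range(len(remaining)):
--             req, cost = remaining[i]
--             if energy >= req:
--                 best = max(best, 1 + dfs(energy - cost, remaining[:i] + remaining[i + 1:]))
--         return best
--     return dfs(k, list(dungeons))
-- ===== Notes on version B (the rewrite author's own statement) =====
-- stated objective: alternative
-- what changed: Replaces full enumeration of all n! permutations (each simulated with skip-over-unaffordable semantics) by a recursive backtracking search that only branches on still-affordable dungeons, pruning dead orderings instead of materialising every permutation.
import Mathlib
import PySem

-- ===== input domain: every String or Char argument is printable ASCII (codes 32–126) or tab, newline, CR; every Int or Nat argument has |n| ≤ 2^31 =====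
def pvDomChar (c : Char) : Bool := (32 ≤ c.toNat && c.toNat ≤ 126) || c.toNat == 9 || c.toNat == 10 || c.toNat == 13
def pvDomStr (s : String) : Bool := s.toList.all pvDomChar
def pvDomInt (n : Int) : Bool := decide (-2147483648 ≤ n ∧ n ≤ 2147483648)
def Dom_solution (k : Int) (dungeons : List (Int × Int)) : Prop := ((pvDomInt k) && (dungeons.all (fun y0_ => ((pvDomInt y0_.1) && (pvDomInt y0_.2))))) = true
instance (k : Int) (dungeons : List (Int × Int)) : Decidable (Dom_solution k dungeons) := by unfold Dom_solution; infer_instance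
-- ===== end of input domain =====

-- B replaces enumeration of all permutations by recursive backtracking over affordable choices; alternative decomposition, same results.

-- ===== PORT A =====
-- inner loop of A: state (count, kk); one step per dungeon of the permutation
def simStep (s : Int × Int) (p : Int × Int) : Int × Int :=
  if p.1 ≤ s.2 then (s.1 + 1, s.2 - p.2) else s

def simCount (k : Int) (per : List (Int × Int)) : Int :=
  (per.foldl simStep (0, k)).1

-- itertools.permutations(dungeons, len(dungeons)) = all permutations (List.permutations)
def solution (k : Int) (dungeons : List (Int × Int)) : Int :=
  dungeons.permutations.foldl (fun m per => max m (simCount k per)) 0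

-- ===== PORT B =====
-- choices rem lists exactly the pairs (rem[i], rem[:i] ++ rem[i+1:]) of Source B's loop
def choices {α : Type} : List α → List (α × List α)
  | [] => []
  | x :: xs => (x, xs) :: (choices xs).map (fun p => (p.1, x :: p.2))

-- Source B's dfs; fuel = length of the remaining list (each call removes one element)
def dfsF : Nat → Int → List (Int × Int) → Int
  | 0, _, _ => 0
  | n + 1, energy, rem =>
    (choices rem).foldl (fun best c =>
      if c.1.1 ≤ energy then max best (1 + dfsF n (energy - c.1.2) c.2) else best) 0

def solution_alt (k : Int) (dungeons : List (Int × Int)) : Int :=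
  dfsF dungeons.length k dungeons

-- ===== PRECONDITION & SPEC =====
def Spec_solution (k : Int) (dungeons : List (Int × Int)) (out : Int) : Prop := out = solution_alt k dungeons
instance (k : Int) (dungeons : List (Int × Int)) (out : Int) : Decidable (Spec_solution k dungeons out) := by unfold Spec_solution; infer_instance

-- ===== CLAIM (what is proved, stated in full; the proofs are below) =====
def Claim_equal_solution : Prop := ∀ (k : Int) (dungeons : List (Int × Int)), Dom_solution k dungeons → Spec_solution k dungeons (solution k dungeons)

-- ===== LEMMAS AND PROOFS =====

-- generic foldl-max lemmas (shape of A's outer loop)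
lemma foldA_ge_init {α : Type} (f : α → Int) :
    ∀ (l : List α) (b : Int), b ≤ l.foldl (fun m x => max m (f x)) b := by
  intro l
  induction l with
  | nil => intro b; simp
  | cons a t ih =>
    intro b
    simpa [List.foldl] using le_trans (le_max_left b (f a)) (ih (max b (f a)))

lemma foldA_ge_mem {α : Type} (f : α → Int) :
    ∀ (l : List α) (b : Int) (x : α), x ∈ l → f x ≤ l.foldl (fun m y => max m (f y)) b := by
  intro l
  induction l with
  | nil => intro b x h; simp at h
  | cons a t ih =>
    intro b x hx
    rcases List.mem_cons.mp hx with h | h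
    · subst h
      simpa [List.foldl] using le_trans (le_max_right b (f x)) (foldA_ge_init f t _)
    · simpa [List.foldl] using ih _ x h

lemma foldA_le {α : Type} (f : α → Int) :
    ∀ (l : List α) (b B : Int), b ≤ B → (∀ x ∈ l, f x ≤ B) →
      l.foldl (fun m y => max m (f y)) b ≤ B := by
  intro l
  induction l with
  | nil => intro b B hb _; simpa using hb
  | cons a t ih =>
    intro b B hb hmem
    simp only [List.foldl]
    exact ih _ _ (max_le hb (hmem a (by simp))) (fun x hx => hmem x (by simp [hx]))

-- generic foldl-max lemmas with a guard (shape of B's loop)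
lemma foldB_ge_init {α : Type} (P : α → Prop) [DecidablePred P] (g : α → Int) :
    ∀ (l : List α) (b : Int),
      b ≤ l.foldl (fun best c => if P c then max best (g c) else best) b := by
  intro l
  induction l with
  | nil => intro b; simp
  | cons a t ih =>
    intro b
    simp only [List.foldl]
    split
    · exact le_trans (le_max_left _ _) (ih _)
    · exact ih b

lemma foldB_ge_mem {α : Type} (P : α → Prop) [DecidablePred P] (g : α → Int) :
    ∀ (l : List α) (b : Int) (c : α), c ∈ l → P c →
      g c ≤ l.foldl (fun best c => if P c then max best (g c) else best) b := by
  intro l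
  induction l with
  | nil => intro b c h; simp at h
  | cons a t ih =>
    intro b c hc hP
    rcases List.mem_cons.mp hc with h | h
    · subst h
      simp only [List.foldl, if_pos hP]
      exact le_trans (le_max_right _ _) (foldB_ge_init P g t _)
    · simp only [List.foldl]
      exact ih _ c h hP

lemma foldB_le {α : Type} (P : α → Prop) [DecidablePred P] (g : α → Int) :
    ∀ (l : List α) (b B : Int), b ≤ B → (∀ c ∈ l, P c → g c ≤ B) →
      l.foldl (fun best c => if P c then max best (g c) else best) b ≤ B := by
  intro l
  induction l with
  | nil => intro b B hb _; simpa using hb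
  | cons a t ih =>
    intro b B hb hmem
    simp only [List.foldl]
    split
    · exact ih _ _ (max_le hb (hmem a (by simp) (by assumption))) (fun x hx hP => hmem x (by simp [hx]) hP)
    · exact ih _ _ hb (fun x hx hP => hmem x (by simp [hx]) hP)

-- simCount facts
lemma simCount_shift :
    ∀ (per : List (Int × Int)) (c kk : Int),
      (per.foldl simStep (c, kk)).1 = c + (per.foldl simStep (0, kk)).1 := by
  intro per
  induction per with
  | nil => intro c kk; simp
  | cons p t ih =>
    intro c kk
    simp only [List.foldl, simStep]
    split
    · rw [ih (c + 1), ih (0 + 1)]; ring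
    · exact ih c kk

lemma simCount_cons (k : Int) (p : Int × Int) (per : List (Int × Int)) :
    simCount k (p :: per) =
      if p.1 ≤ k then 1 + simCount (k - p.2) per else simCount k per := by
  simp only [simCount, List.foldl, simStep]
  split
  · have h := simCount_shift per (0 + 1) (k - p.2)
    omega
  · rfl

lemma simCount_nonneg : ∀ (per : List (Int × Int)) (k : Int), 0 ≤ simCount k per := by
  intro per
  induction per with
  | nil => intro k; simp [simCount]
  | cons p t ih =>
    intro k
    rw [simCount_cons]
    split
    · have := ih (k - p.2); omega
    · exact ih k

-- choices facts
lemma choices_mem_append {α : Type} :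
    ∀ (l r : List α) (x : α), (x, l ++ r) ∈ choices (l ++ x :: r) := by
  intro l
  induction l with
  | nil => intro r x; simp [choices]
  | cons a t ih =>
    intro r x
    simp only [List.cons_append, choices, List.mem_cons]
    right
    exact List.mem_map.mpr ⟨(x, t ++ r), ih r x, rfl⟩

lemma perm_of_mem_choices {α : Type} :
    ∀ (ds : List α) (x : α) (sub : List α), (x, sub) ∈ choices ds → ds.Perm (x :: sub) := by
  intro ds
  induction ds with
  | nil => intro x sub h; simp [choices] at h
  | cons a t ih =>
    intro x sub h
    simp only [choices, List.mem_cons] at h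
    rcases h with h | h
    · simp only [Prod.mk.injEq] at h
      obtain ⟨rfl, rfl⟩ := h
      exact List.Perm.refl _
    · obtain ⟨⟨y, ys⟩, hmem, heq⟩ := List.mem_map.mp h
      simp only [Prod.mk.injEq] at heq
      obtain ⟨rfl, rfl⟩ := heq
      exact ((ih y ys hmem).cons a).trans (List.Perm.swap _ _ _)

lemma choices_exchange {α : Type} :
    ∀ (ds : List α) (x : α) (sub : List α) (y : α) (sub' : List α),
      (x, sub) ∈ choices ds → (y, sub') ∈ choices sub →
      ∃ ds', (y, ds') ∈ choices ds ∧ (x, sub') ∈ choices ds' := by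
  intro ds
  induction ds with
  | nil => intro x sub y sub' h; simp [choices] at h
  | cons a t ih =>
    intro x sub y sub' hx hy
    simp only [choices, List.mem_cons] at hx
    rcases hx with hx | hx
    · simp only [Prod.mk.injEq] at hx
      obtain ⟨rfl, rfl⟩ := hx
      refine ⟨x :: sub', ?_, ?_⟩
      · simp only [choices, List.mem_cons]
        right
        exact List.mem_map.mpr ⟨(y, sub'), hy, rfl⟩
      · simp [choices]
    · obtain ⟨⟨x', s⟩, hmem, heq⟩ := List.mem_map.mp hx
      simp only [Prod.mk.injEq] at heq
      obtain ⟨rfl, rfl⟩ := heq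
      simp only [choices, List.mem_cons] at hy
      rcases hy with hy | hy
      · simp only [Prod.mk.injEq] at hy
        obtain ⟨rfl, rfl⟩ := hy
        exact ⟨t, by simp [choices], hmem⟩
      · obtain ⟨⟨y', s'⟩, hmem', heq'⟩ := List.mem_map.mp hy
        simp only [Prod.mk.injEq] at heq'
        obtain ⟨rfl, rfl⟩ := heq'
        obtain ⟨t', ht1, ht2⟩ := ih x' s y' s' hmem hmem'
        refine ⟨a :: t', ?_, ?_⟩
        · simp only [choices, List.mem_cons]
          right
          exact List.mem_map.mpr ⟨(y', t'), ht1, rfl⟩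
        · simp only [choices, List.mem_cons]
          right
          exact List.mem_map.mpr ⟨(x', s'), ht2, rfl⟩

lemma dfsF_nonneg : ∀ (n : Nat) (k : Int) (rem : List (Int × Int)), 0 ≤ dfsF n k rem := by
  intro n k rem
  cases n with
  | zero => simp [dfsF]
  | succ n =>
    simp only [dfsF]
    exact foldB_ge_init (fun c : (Int × Int) × List (Int × Int) => c.1.1 ≤ k) (fun c => 1 + dfsF n (k - c.1.2) c.2) _ 0

lemma dfsF_ge_choice (n : Nat) (k : Int) (rem : List (Int × Int)) (c : (Int × Int) × List (Int × Int))
    (hc : c ∈ choices rem) (hP : c.1.1 ≤ k) :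
    1 + dfsF n (k - c.1.2) c.2 ≤ dfsF (n + 1) k rem := by
  simp only [dfsF]
  exact foldB_ge_mem (fun c : (Int × Int) × List (Int × Int) => c.1.1 ≤ k) (fun c => 1 + dfsF n (k - c.1.2) c.2) _ 0 c hc hP

lemma dfsF_le (n : Nat) (k B : Int) (rem : List (Int × Int))
    (hB : 0 ≤ B)
    (h : ∀ c ∈ choices rem, c.1.1 ≤ k → 1 + dfsF n (k - c.1.2) c.2 ≤ B) :
    dfsF (n + 1) k rem ≤ B := by
  simp only [dfsF]
  exact foldB_le (fun c : (Int × Int) × List (Int × Int) => c.1.1 ≤ k) (fun c => 1 + dfsF n (k - c.1.2) c.2) _ 0 B hB h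

lemma dfsF_mono :
    ∀ (n : Nat) (x : Int × Int) (sub ds : List (Int × Int)) (e : Int),
      (x, sub) ∈ choices ds → dfsF n e sub ≤ dfsF (n + 1) e ds := by
  intro n
  induction n with
  | zero => intro x sub ds e _; simpa [dfsF] using dfsF_nonneg 1 e ds
  | succ n ih =>
    intro x sub ds e hx
    apply dfsF_le _ _ _ _ (dfsF_nonneg _ _ _)
    intro c hc hP
    obtain ⟨ds', hd1, hd2⟩ := choices_exchange ds x sub c.1 c.2 hx hc
    have h1 : dfsF n (e - c.1.2) c.2 ≤ dfsF (n + 1) (e - c.1.2) ds' := ih x c.2 ds' (e - c.1.2) hd2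
    have h2 : 1 + dfsF (n + 1) (e - c.1.2) ds' ≤ dfsF (n + 1 + 1) e ds :=
      dfsF_ge_choice (n + 1) e ds (c.1, ds') hd1 hP
    omega

lemma simCount_le_dfsF :
    ∀ (per ds : List (Int × Int)) (k : Int), per.Perm ds →
      simCount k per ≤ dfsF ds.length k ds := by
  intro per
  induction per with
  | nil =>
    intro ds k h
    have : ds = [] := h.symm.eq_nil
    subst this
    simp [simCount, dfsF]
  | cons p rest ih =>
    intro ds k h
    have hp : p ∈ ds := h.mem_iff.mp (by simp)
    obtain ⟨l, r, rfl⟩ := List.append_of_mem hp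
    have hrest : rest.Perm (l ++ r) := by
      have h2 : (p :: rest).Perm (p :: (l ++ r)) := h.trans List.perm_middle
      exact h2.cons_inv
    have hlen : (l ++ p :: r).length = (l ++ r).length + 1 := by simp; omega
    have hmem : (p, l ++ r) ∈ choices (l ++ p :: r) := choices_mem_append l r p
    rw [simCount_cons]
    split
    · have h1 : simCount (k - p.2) rest ≤ dfsF (l ++ r).length (k - p.2) (l ++ r) :=
        ih (l ++ r) (k - p.2) hrest
      have h2 : 1 + dfsF (l ++ r).length (k - p.2) (l ++ r) ≤ dfsF ((l ++ r).length + 1) k (l ++ p :: r) :=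
        dfsF_ge_choice _ k _ (p, l ++ r) hmem (by assumption)
      rw [hlen]; omega
    · have h1 : simCount k rest ≤ dfsF (l ++ r).length k (l ++ r) := ih (l ++ r) k hrest
      have h2 : dfsF (l ++ r).length k (l ++ r) ≤ dfsF ((l ++ r).length + 1) k (l ++ p :: r) :=
        dfsF_mono _ p _ _ k hmem
      rw [hlen]; omega

lemma simCount_le_solution (k : Int) (ds per : List (Int × Int)) (h : per ∈ ds.permutations) :
    simCount k per ≤ solution k ds :=
  foldA_ge_mem (simCount k) ds.permutations 0 per h

lemma solution_push (k : Int) (x : Int × Int) (ds sub : List (Int × Int))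
    (hx : x.1 ≤ k) (hperm : ds.Perm (x :: sub)) :
    1 + solution (k - x.2) sub ≤ solution k ds := by
  have hxsub : (x :: sub) ∈ ds.permutations := List.mem_permutations.mpr hperm.symm
  have hone : 1 ≤ solution k ds := by
    have h1 : simCount k (x :: sub) ≤ solution k ds := simCount_le_solution k ds _ hxsub
    rw [simCount_cons, if_pos hx] at h1
    have := simCount_nonneg sub (k - x.2)
    omega
  have hsub : solution (k - x.2) sub ≤ solution k ds - 1 := by
    apply foldA_le (simCount (k - x.2)) sub.permutations 0 (solution k ds - 1) (by omega)
    intro per hper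
    have hp : (x :: per) ∈ ds.permutations := by
      refine List.mem_permutations.mpr ?_
      exact ((List.mem_permutations.mp hper).cons x).trans hperm.symm
    have h1 : simCount k (x :: per) ≤ solution k ds := simCount_le_solution k ds _ hp
    rw [simCount_cons, if_pos hx] at h1
    omega
  omega

lemma dfsF_le_solution :
    ∀ (n : Nat) (k : Int) (ds : List (Int × Int)), dfsF n k ds ≤ solution k ds := by
  intro n
  induction n with
  | zero =>
    intro k ds
    simpa [dfsF] using foldA_ge_init (simCount k) ds.permutations 0
  | succ n ih =>
    intro k ds
    apply dfsF_le
    · exact le_trans (by norm_num) (foldA_ge_init (simCount k) ds.permutations 0)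
    · intro c hc hP
      have h1 : dfsF n (k - c.1.2) c.2 ≤ solution (k - c.1.2) c.2 := ih (k - c.1.2) c.2
      have h2 : 1 + solution (k - c.1.2) c.2 ≤ solution k ds :=
        solution_push k c.1 ds c.2 hP (perm_of_mem_choices ds c.1 c.2 hc)
      omega

lemma solution_le_alt (k : Int) (ds : List (Int × Int)) :
    solution k ds ≤ solution_alt k ds := by
  apply foldA_le (simCount k) ds.permutations 0 _ (dfsF_nonneg _ _ _)
  intro per hper
  exact simCount_le_dfsF per ds k (List.mem_permutations.mp hper)

-- ===== VERDICT (by name: the statement is the Claim_ definition above) =====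
theorem solution_spec : Claim_equal_solution := by
  intro k ds _
  unfold Spec_solution
  exact le_antisymm (solution_le_alt k ds) (dfsF_le_solution ds.length k ds)
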